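-- pv_equiv track=rewrite | github.com/jderiu/valuenet | src/preprocessing/utils.py | get_multi_token_match
-- ===== SOURCE A (Python) =====
-- def get_multi_token_match(question_tokens, idx, n_question_tokens, column_header_tokens):
--     for endIdx in reversed(range(idx + 1, n_question_tokens + 1)):  # we go backwards though the remaining tokens (so from idx to the last word of the question)
--         sub_tokens = question_tokens[idx: endIdx]
--         if len(sub_tokens) > 1:   # and as long as we still have tokens
--             sub_tokens = " ".join(sub_tokens)
--             if sub_tokens in column_header_tokens:  # we check if this tokens (e.g. "artist song name") are a column header
--                 return endIdx, sub_tokens  # if yes, we return the new end-index and the sub-tokens, which will then be marked with "col"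
--     return idx, None
-- ===== SOURCE B (Python) =====
-- def get_multi_token_match(question_tokens, idx, n_question_tokens, column_header_tokens):
--     # stage 1: collect every end index whose (multi-token) phrase is a column header
--     matches = [e for e in range(idx + 1, n_question_tokens + 1)
--                if len(question_tokens[idx:e]) > 1
--                and " ".join(question_tokens[idx:e]) in column_header_tokens]
--     # stage 2: the indices are increasing, so the last match is the longest phrase
--     if not matches:
--         return idx, None
--     e = matches[-1]
--     return e, " ".join(question_tokens[idx:e])
-- ===== Notes on version B (the rewrite author's own statement) =====
-- stated objective: alternative
-- what changed: B replaces A's backwards single scan with early return by two staged passes: a forward filter that materialises the list of all matching end indices, then selection of its last element and one final join to rebuild the phrase.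
import Mathlib
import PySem

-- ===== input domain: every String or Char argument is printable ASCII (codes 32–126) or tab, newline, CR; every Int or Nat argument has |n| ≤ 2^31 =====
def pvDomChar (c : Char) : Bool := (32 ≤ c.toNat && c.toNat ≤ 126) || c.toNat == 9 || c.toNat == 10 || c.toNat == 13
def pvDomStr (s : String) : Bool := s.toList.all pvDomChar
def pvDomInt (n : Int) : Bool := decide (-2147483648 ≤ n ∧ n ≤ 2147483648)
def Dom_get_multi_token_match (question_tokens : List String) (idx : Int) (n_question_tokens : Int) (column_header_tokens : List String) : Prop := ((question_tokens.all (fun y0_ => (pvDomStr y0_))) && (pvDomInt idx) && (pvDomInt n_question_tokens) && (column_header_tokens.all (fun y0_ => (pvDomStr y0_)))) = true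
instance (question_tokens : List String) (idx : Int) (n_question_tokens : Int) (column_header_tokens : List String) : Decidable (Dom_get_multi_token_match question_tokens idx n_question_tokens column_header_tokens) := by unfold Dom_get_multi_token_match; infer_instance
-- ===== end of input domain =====

-- B replaces A's backwards early-return scan by two staged passes (filter all matching
-- end indices forward, then take the last and rebuild the phrase once); same cost, different decomposition.

-- ===== PORT A =====
-- A's loop over reversed(range(idx+1, n+1)) with early return, as structural recursion on that list.
def pvALoop (question_tokens : List String) (idx : Int) (column_header_tokens : List String) : List Int → Int × Option String
  | [] => (idx, none)
  | endIdx :: rest =>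
    let sub := PySem.List.slice question_tokens (some idx) (some endIdx)
    if sub.length > 1 then
      let s := PySem.Str.join " " sub
      if column_header_tokens.contains s then (endIdx, some s)
      else pvALoop question_tokens idx column_header_tokens rest
    else pvALoop question_tokens idx column_header_tokens rest

def get_multi_token_match (question_tokens : List String) (idx : Int) (n_question_tokens : Int) (column_header_tokens : List String) : Int × Option String :=
  pvALoop question_tokens idx column_header_tokens
    (PySem.List.pyRange (idx + 1) (n_question_tokens + 1) 1).reverse

-- ===== PORT B =====
-- the comprehension's condition on an end index e
def pvMatchB (question_tokens : List String) (idx : Int) (column_header_tokens : List String) (e : Int) : Bool :=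
  decide (1 < (PySem.List.slice question_tokens (some idx) (some e)).length) &&
    column_header_tokens.contains (PySem.Str.join " " (PySem.List.slice question_tokens (some idx) (some e)))

def get_multi_token_match_alt (question_tokens : List String) (idx : Int) (n_question_tokens : Int) (column_header_tokens : List String) : Int × Option String :=
  let ms := (PySem.List.pyRange (idx + 1) (n_question_tokens + 1) 1).filter
    (pvMatchB question_tokens idx column_header_tokens)
  match PySem.List.pyGet? ms (-1) with   -- matches[-1]; none iff the match list is empty
  | none => (idx, none)
  | some e => (e, PySem.Str.join " " (PySem.List.slice question_tokens (some idx) (some e)))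

-- ===== PRECONDITION & SPEC =====
def Spec_get_multi_token_match (question_tokens : List String) (idx : Int) (n_question_tokens : Int) (column_header_tokens : List String) (out : Int × Option String) : Prop := out = get_multi_token_match_alt question_tokens idx n_question_tokens column_header_tokens
instance (question_tokens : List String) (idx : Int) (n_question_tokens : Int) (column_header_tokens : List String) (out : Int × Option String) : Decidable (Spec_get_multi_token_match question_tokens idx n_question_tokens column_header_tokens out) := by unfold Spec_get_multi_token_match; infer_instance

-- ===== CLAIM (what is proved, stated in full; the proofs are below) =====
def Claim_equal_get_multi_token_match : Prop := ∀ (question_tokens : List String) (idx : Int) (n_question_tokens : Int) (column_header_tokens : List String), Dom_get_multi_token_match question_tokens idx n_question_tokens column_header_tokens → Spec_get_multi_token_match question_tokens idx n_question_tokens column_header_tokens (get_multi_token_match question_tokens idx n_question_tokens column_header_tokens)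

-- ===== LEMMAS AND PROOFS =====

-- A's first match scanning the reversed list = the LAST element of the forward filter
theorem pvALoop_reverse_eq_filter_last (question_tokens : List String) (idx : Int)
    (column_header_tokens : List String) (l : List Int) :
    pvALoop question_tokens idx column_header_tokens l.reverse =
      match (l.filter (pvMatchB question_tokens idx column_header_tokens)).getLast? with
      | none => (idx, none)
      | some e => (e, PySem.Str.join " " (PySem.List.slice question_tokens (some idx) (some e))) := by
  induction l using List.reverseRecOn with
  | nil => rfl
  | append_singleton l x ih =>
    rw [List.reverse_append, List.filter_append]
    simp only [List.reverse_singleton, List.singleton_append]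
    rw [pvALoop]
    simp only [List.filter_cons, List.filter_nil]
    by_cases h1 : 1 < (PySem.List.slice question_tokens (some idx) (some x)).length
    · by_cases h2 : column_header_tokens.contains
          (PySem.Str.join " " (PySem.List.slice question_tokens (some idx) (some x))) = true
      · have hm : pvMatchB question_tokens idx column_header_tokens x = true := by
          simp only [pvMatchB, h2, Bool.and_true]; exact decide_eq_true h1
        rw [if_pos h1, if_pos h2, hm]
        simp
      · have hm : pvMatchB question_tokens idx column_header_tokens x = false := by
          simp only [pvMatchB, eq_false_of_ne_true h2, Bool.and_false]
        rw [if_pos h1, if_neg h2, hm]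
        simpa using ih
    · have hm : pvMatchB question_tokens idx column_header_tokens x = false := by
        simp only [pvMatchB, decide_eq_false h1, Bool.false_and]
      rw [if_neg h1, hm]
      simpa using ih

-- ===== VERDICT (by name: the statement is the Claim_ definition above) =====
theorem get_multi_token_match_spec : Claim_equal_get_multi_token_match := by
  intro q idx n ch _
  unfold Spec_get_multi_token_match get_multi_token_match get_multi_token_match_alt
  rw [pvALoop_reverse_eq_filter_last]
  simp only [PySem.List.pyGet?_neg_one]
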